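-- pv_equiv track=rewrite | github.com/qoocrab/project-algorithm-programmers | level_0/KCH/20230925/캐릭터의좌표.py | solution
-- ===== SOURCE A (Python) =====
-- def solution(keyinput, board):
--     way = {'left' : (-1,0),
--            'right' : (1,0),
--            'up' : (0,1),
--            'down': (0,-1) }
--
--     x, y = 0, 0
--
--     for key in keyinput:
--         tx, ty = way[key]
--         nx, ny = x + tx, y + ty
--
--         if -(board[0]//2)<=nx<=board[0]//2 and -(board[1]//2)<=ny<=board[1]//2:
--             x, y = nx, ny
--
--     return x,y
-- ===== SOURCE B (Python) =====
-- def solution(keyinput, board):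
--     half_x = board[0] // 2
--     half_y = board[1] // 2
--     dx = {'left': -1, 'right': 1, 'up': 0, 'down': 0}
--     x = 0
--     for key in keyinput:
--         x = max(-half_x, min(half_x, x + dx[key]))
--     dy = {'left': 0, 'right': 0, 'up': 1, 'down': -1}
--     y = 0
--     for key in keyinput:
--         y = max(-half_y, min(half_y, y + dy[key]))
--     return x, y
-- ===== Notes on version B (the rewrite author's own statement) =====
-- stated objective: simpler
-- what changed: Replaces the single loop with a combined two-axis boundary test by two independent branchless passes, each folding one coordinate over its own per-axis move table with max/min clamping (valid because each key moves exactly one axis by 1 while the other stays in range).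
-- outside the precondition, e.g. on solution(['left'], [-1, -1]): A returns (0, 0), B returns (1, 1)
import Mathlib
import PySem

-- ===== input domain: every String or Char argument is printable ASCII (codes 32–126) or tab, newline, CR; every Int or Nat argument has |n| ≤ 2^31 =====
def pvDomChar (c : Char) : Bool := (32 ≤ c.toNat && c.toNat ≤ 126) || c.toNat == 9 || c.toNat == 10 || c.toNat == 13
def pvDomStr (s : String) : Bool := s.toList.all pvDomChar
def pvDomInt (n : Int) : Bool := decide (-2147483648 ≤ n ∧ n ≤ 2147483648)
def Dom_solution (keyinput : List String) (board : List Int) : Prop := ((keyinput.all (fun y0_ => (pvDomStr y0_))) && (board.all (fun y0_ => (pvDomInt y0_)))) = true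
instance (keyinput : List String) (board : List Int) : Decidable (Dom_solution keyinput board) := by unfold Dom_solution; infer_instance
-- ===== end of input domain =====

-- B replaces the dict lookup and two-axis boundary branch by two independent branchless clamped passes, one per axis (simpler decomposition; no speed claim).

-- ===== PORT A =====
def pvWay : PySem.Dict String (Int × Int) :=
  PySem.Dict.ofList [("left", ((-1 : Int), (0 : Int))), ("right", (1, 0)), ("up", (0, 1)), ("down", (0, -1))]

-- loop body of A: look up the move, form (nx, ny), keep it iff inside both bounds
def pvStepA (h0 h1 : Int) (p : Int × Int) (key : String) : Int × Int :=
  let t := (pvWay.get? key).getD (0, 0)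
  let nx := p.1 + t.1
  let ny := p.2 + t.2
  if -h0 ≤ nx ∧ nx ≤ h0 ∧ -h1 ≤ ny ∧ ny ≤ h1 then (nx, ny) else p

def solution (keyinput : List String) (board : List Int) : Int × Int :=
  let h0 := PySem.Int.floordiv (PySem.List.pyGetD board 0 0) 2
  let h1 := PySem.Int.floordiv (PySem.List.pyGetD board 1 0) 2
  keyinput.foldl (pvStepA h0 h1) ((0 : Int), (0 : Int))

-- ===== PORT B =====
def pvClamp (h v : Int) : Int := max (-h) (min h v)

-- B's per-axis move tables
def pvDx : PySem.Dict String Int := PySem.Dict.ofList [("left", -1), ("right", 1), ("up", 0), ("down", 0)]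
def pvDy : PySem.Dict String Int := PySem.Dict.ofList [("left", 0), ("right", 0), ("up", 1), ("down", -1)]

-- loop body of B's first pass (horizontal axis only)
def pvStepH (hx x : Int) (key : String) : Int := pvClamp hx (x + (pvDx.get? key).getD 0)

-- loop body of B's second pass (vertical axis only)
def pvStepV (hy y : Int) (key : String) : Int := pvClamp hy (y + (pvDy.get? key).getD 0)

def solution_alt (keyinput : List String) (board : List Int) : Int × Int :=
  let hx := PySem.Int.floordiv (PySem.List.pyGetD board 0 0) 2
  let hy := PySem.Int.floordiv (PySem.List.pyGetD board 1 0) 2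
  let x := keyinput.foldl (pvStepH hx) 0
  let y := keyinput.foldl (pvStepV hy) 0
  (x, y)

-- ===== PRECONDITION & SPEC =====
-- Pre_ restricts to the task's natural domain: a board of (at least) two NONNEGATIVE dimensions and only the four
-- arrow keys. A raises (IndexError/KeyError) on short boards and unknown keys; on negative dimensions A returns a
-- value (it freezes at (0,0) because the box is empty), a degenerate input outside the problem's domain on which
-- B's clamping differs.
def Pre_solution (keyinput : List String) (board : List Int) : Prop :=
  2 ≤ board.length ∧ 0 ≤ board.getD 0 0 ∧ 0 ≤ board.getD 1 0 ∧
  ∀ k ∈ keyinput, k = "left" ∨ k = "right" ∨ k = "up" ∨ k = "down"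
instance (keyinput : List String) (board : List Int) : Decidable (Pre_solution keyinput board) := by
  unfold Pre_solution; infer_instance

def pvWitness_solution : List String × List Int := (["left", "left", "up"], [3, 5])

def Spec_solution (keyinput : List String) (board : List Int) (out : Int × Int) : Prop := out = solution_alt keyinput board
instance (keyinput : List String) (board : List Int) (out : Int × Int) : Decidable (Spec_solution keyinput board out) := by unfold Spec_solution; infer_instance

-- ===== CLAIM (what is proved, stated in full; the proofs are below) =====
def Claim_equal_solution : Prop := ∀ (keyinput : List String) (board : List Int), Dom_solution keyinput board → Pre_solution keyinput board → Spec_solution keyinput board (solution keyinput board)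

-- ===== LEMMAS AND PROOFS =====

lemma pvWay_left : pvWay.get? "left" = some (-1, 0) := by decide
lemma pvWay_right : pvWay.get? "right" = some (1, 0) := by decide
lemma pvDx_vals : pvDx.get? "left" = some (-1) ∧ pvDx.get? "right" = some 1 ∧ pvDx.get? "up" = some 0 ∧ pvDx.get? "down" = some 0 := by decide
lemma pvDy_vals : pvDy.get? "left" = some 0 ∧ pvDy.get? "right" = some 0 ∧ pvDy.get? "up" = some 1 ∧ pvDy.get? "down" = some (-1) := by decide
lemma pvWay_up : pvWay.get? "up" = some (0, 1) := by decide
lemma pvWay_down : pvWay.get? "down" = some (0, -1) := by decide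

-- one step of A equals the two per-axis clamped steps of B, and the bounds are preserved
lemma pvStep_eq (h0 h1 x y : Int) (hh0 : 0 ≤ h0) (hh1 : 0 ≤ h1)
    (hx1 : -h0 ≤ x) (hx2 : x ≤ h0) (hy1 : -h1 ≤ y) (hy2 : y ≤ h1) (k : String)
    (hk : k = "left" ∨ k = "right" ∨ k = "up" ∨ k = "down") :
    pvStepA h0 h1 (x, y) k = (pvStepH h0 x k, pvStepV h1 y k) ∧
      -h0 ≤ pvStepH h0 x k ∧ pvStepH h0 x k ≤ h0 ∧ -h1 ≤ pvStepV h1 y k ∧ pvStepV h1 y k ≤ h1 := by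
  rcases hk with hk | hk | hk | hk <;> subst hk <;>
    simp only [pvStepA, pvStepH, pvStepV, pvWay_left, pvWay_right, pvWay_up, pvWay_down,
      pvDx_vals.1, pvDx_vals.2.1, pvDx_vals.2.2.1, pvDx_vals.2.2.2,
      pvDy_vals.1, pvDy_vals.2.1, pvDy_vals.2.2.1, pvDy_vals.2.2.2,
      pvClamp, Option.getD_some] <;>
    norm_num <;> split_ifs <;> simp_all <;> omega

lemma pv_fold_eq (h0 h1 : Int) (hh0 : 0 ≤ h0) (hh1 : 0 ≤ h1) :
    ∀ (ks : List String) (x y : Int),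
      (∀ k ∈ ks, k = "left" ∨ k = "right" ∨ k = "up" ∨ k = "down") →
      -h0 ≤ x → x ≤ h0 → -h1 ≤ y → y ≤ h1 →
      ks.foldl (pvStepA h0 h1) (x, y) = (ks.foldl (pvStepH h0) x, ks.foldl (pvStepV h1) y) := by
  intro ks
  induction ks with
  | nil => intro x y _ _ _ _ _; rfl
  | cons k ks ih =>
    intro x y hv hx1 hx2 hy1 hy2
    obtain ⟨heq, b1, b2, b3, b4⟩ :=
      pvStep_eq h0 h1 x y hh0 hh1 hx1 hx2 hy1 hy2 k (hv k (by simp))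
    simp only [List.foldl_cons, heq]
    exact ih _ _ (fun k' hk' => hv k' (by simp [hk'])) b1 b2 b3 b4

theorem pv_main (keyinput : List String) (board : List Int)
    (hpre : Pre_solution keyinput board) :
    solution keyinput board = solution_alt keyinput board := by
  obtain ⟨hlen, h0, h1, hv⟩ := hpre
  have e0 : PySem.List.pyGetD board 0 0 = board.getD 0 0 := PySem.List.pyGetD_zero board 0
  have e1 : PySem.List.pyGetD board 1 0 = board.getD 1 0 := by
    have := PySem.List.pyGetD_natCast (xs := board) (n := 1) (d := 0)
    simpa using this
  have hfd0 : 0 ≤ PySem.Int.floordiv (board.getD 0 0) 2 := by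
    rw [PySem.Int.floordiv_eq_ediv_of_pos (by norm_num)]
    exact Int.ediv_nonneg h0 (by norm_num)
  have hfd1 : 0 ≤ PySem.Int.floordiv (board.getD 1 0) 2 := by
    rw [PySem.Int.floordiv_eq_ediv_of_pos (by norm_num)]
    exact Int.ediv_nonneg h1 (by norm_num)
  simp only [solution, solution_alt, e0, e1]
  exact pv_fold_eq _ _ hfd0 hfd1 keyinput 0 0 hv (by omega) (by omega) (by omega) (by omega)

-- ===== VERDICT (by name: the statement is the Claim_ definition above) =====
theorem solution_spec : Claim_equal_solution := by
  intro keyinput board _ hpre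
  unfold Spec_solution
  exact pv_main keyinput board hpre
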